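-- pv_equiv track=rewrite | github.com/ggaitsgori/GMU | visualization.py | zones_from_k
-- ===== SOURCE A (Python) =====
-- def zones_from_k(k: list, n: int) -> list:
--     """
--     Build contiguous zone intervals [i0, i1) with constant active-player sets.
--     Returns list of (i0, i1, players_tuple).
--     """
--     m = len(k)
--     k = [int(min(max(0, kj), n)) for kj in k]
--     active_sets = [tuple(j for j in range(m) if k[j] > i) for i in range(n)]
--     zones = []
--     i0 = 0
--     while i0 < n:
--         s = active_sets[i0]
--         i1 = i0 + 1
--         while i1 < n and active_sets[i1] == s:
--             i1 += 1
--         zones.append((i0, i1, s))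
--         i0 = i1
--     return zones
-- ===== SOURCE B (Python) =====
-- def zones_from_k(k: list, n: int) -> list:
--     """
--     Build contiguous zone intervals [i0, i1) with constant active-player sets.
--     Instead of materialising an active set for every i in range(n), jump from
--     zone boundary to zone boundary: the next boundary after a is the smallest
--     clamped k-value strictly greater than a (or n). O(m^2), independent of n.
--     """
--     kc = [int(min(max(0, kj), n)) for kj in k]
--     zones = []
--     a = 0
--     while a < n:
--         b = min((v for v in kc if v > a), default=n)
--         zones.append((a, b, tuple(j for j, v in enumerate(kc) if v > a)))
--         a = b
--     return zones
-- ===== Notes on version B (the rewrite author's own statement) =====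
-- stated objective: faster
-- what changed: Instead of materialising an active-player set for every cell i in range(n) and scanning cells one by one for runs, B jumps from zone boundary to zone boundary (the next boundary is the smallest clamped k-value above the current one) and builds one active tuple per zone, so the cost no longer grows with n.
import Mathlib
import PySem

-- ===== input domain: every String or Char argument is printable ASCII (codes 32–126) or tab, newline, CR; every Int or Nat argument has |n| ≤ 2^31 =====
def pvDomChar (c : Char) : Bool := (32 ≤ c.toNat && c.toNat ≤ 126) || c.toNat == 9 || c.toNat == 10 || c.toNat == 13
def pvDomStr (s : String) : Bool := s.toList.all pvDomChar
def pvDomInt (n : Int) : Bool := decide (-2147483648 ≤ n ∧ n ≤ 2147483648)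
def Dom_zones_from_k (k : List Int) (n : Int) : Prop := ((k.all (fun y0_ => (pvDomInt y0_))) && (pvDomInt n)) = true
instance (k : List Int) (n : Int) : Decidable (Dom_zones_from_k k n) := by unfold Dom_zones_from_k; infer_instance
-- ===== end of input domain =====

-- B replaces A's per-cell scan over all n cells by jumping directly from zone
-- boundary to zone boundary (the next boundary is the smallest clamped k-value
-- above the current one), so its cost no longer grows with n (objective: faster).

-- ===== PORT A =====
-- inner 'while i1 < n and active_sets[i1] == s: i1 += 1'
def pvInnerA (as : List (List Int)) (n : Int) (s : List Int) (i1 : Int) : Int :=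
  if _h : i1 < n ∧ PySem.List.pyGetD as i1 [] = s then pvInnerA as n s (i1 + 1) else i1
termination_by (n - i1).toNat
decreasing_by omega

-- termination fact the outer loop's decreasing_by cites
theorem le_pvInnerA (as : List (List Int)) (n : Int) (s : List Int) (i1 : Int) :
    i1 ≤ pvInnerA as n s i1 := by
  unfold pvInnerA
  split
  · have := le_pvInnerA as n s (i1 + 1); omega
  · omega
termination_by (n - i1).toNat
decreasing_by omega

-- outer 'while i0 < n: …'
def pvOuterA (as : List (List Int)) (n : Int) (i0 : Int) : List (Int × Int × List Int) :=
  if _h : i0 < n then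
    (i0, pvInnerA as n (PySem.List.pyGetD as i0 []) (i0 + 1), PySem.List.pyGetD as i0 []) ::
      pvOuterA as n (pvInnerA as n (PySem.List.pyGetD as i0 []) (i0 + 1))
  else []
termination_by (n - i0).toNat
decreasing_by have := le_pvInnerA as n (PySem.List.pyGetD as i0 []) (i0 + 1); omega

def zones_from_k (k : List Int) (n : Int) : List (Int × Int × List Int) :=
  let m : Int := PySem.List.len k
  let kc := k.map (fun kj => min (max 0 kj) n)
  let activeSets := (PySem.List.pyRange 0 n 1).map (fun i =>
    (PySem.List.pyRange 0 m 1).filter (fun j => PySem.List.pyGetD kc j 0 > i))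
  pvOuterA activeSets n 0

-- ===== PORT B =====
-- tuple(j for j, v in enumerate(kc) if v > a)
def pvActiveB (kc : List Int) (a : Int) : List Int :=
  ((PySem.List.enumerate kc).filter (fun p => p.2 > a)).map (fun p => p.1)

-- min((v for v in kc if v > a), default=n)
def pvNextB (kc : List Int) (a n : Int) : Int :=
  PySem.List.minD (kc.filter (fun v => v > a)) (fun x => x) n

-- termination fact the alt loop's decreasing_by cites
theorem lt_pvNextB (kc : List Int) (a n : Int) (h : a < n) : a < pvNextB kc a n := by
  unfold pvNextB
  rcases hm : PySem.List.min? (kc.filter (fun v => v > a)) (fun x => x) with _ | m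
  · simp [PySem.List.minD, hm, h]
  · have hmem := PySem.List.min?_mem hm
    simp only [List.mem_filter, decide_eq_true_eq] at hmem
    simp [PySem.List.minD, hm]
    omega

-- 'while a < n: …'
def pvAltLoop (kc : List Int) (n : Int) (a : Int) : List (Int × Int × List Int) :=
  if _h : a < n then
    (a, pvNextB kc a n, pvActiveB kc a) :: pvAltLoop kc n (pvNextB kc a n)
  else []
termination_by (n - a).toNat
decreasing_by have := lt_pvNextB kc a n _h; omega

def zones_from_k_alt (k : List Int) (n : Int) : List (Int × Int × List Int) :=
  let kc := k.map (fun kj => min (max 0 kj) n)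
  pvAltLoop kc n 0

-- ===== PRECONDITION & SPEC =====
def Spec_zones_from_k (k : List Int) (n : Int) (out : List (Int × Int × List Int)) : Prop := out = zones_from_k_alt k n
instance (k : List Int) (n : Int) (out : List (Int × Int × List Int)) : Decidable (Spec_zones_from_k k n out) := by unfold Spec_zones_from_k; infer_instance

-- ===== CLAIM (what is proved, stated in full; the proofs are below) =====
def Claim_equal_zones_from_k : Prop := ∀ (k : List Int) (n : Int), Dom_zones_from_k k n → Spec_zones_from_k k n (zones_from_k k n)

-- ===== LEMMAS AND PROOFS =====

-- A's active set at cell i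
def pvActiveA (kc : List Int) (i : Int) : List Int :=
  (PySem.List.pyRange 0 (PySem.List.len kc) 1).filter (fun j => PySem.List.pyGetD kc j 0 > i)

-- A's active_sets list
def pvAS (kc : List Int) (n : Int) : List (List Int) :=
  (PySem.List.pyRange 0 n 1).map (fun i => pvActiveA kc i)

theorem pvActiveB_eq (kc : List Int) (a : Int) : pvActiveB kc a = pvActiveA kc a := by
  unfold pvActiveB pvActiveA
  rw [PySem.List.enumerate_eq_map_pyRange kc 0, List.filter_map, List.map_map]
  simp [Function.comp_def]

theorem pvActiveA_congr (kc : List Int) (a i : Int) (hai : a ≤ i)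
    (h : ∀ v ∈ kc, ¬(a < v ∧ v ≤ i)) : pvActiveA kc i = pvActiveA kc a := by
  unfold pvActiveA
  apply List.filter_congr
  intro j hj
  rw [PySem.List.mem_pyRange_one] at hj
  have hjlt : j < (kc.length : Int) := by
    have := hj.2; rwa [PySem.List.len_eq] at this
  have hget : PySem.List.pyGetD kc j 0 = kc[j.toNat] :=
    PySem.List.pyGetD_eq_getElem kc 0 hj.1 (by omega)
  have hmem : kc[j.toNat] ∈ kc := List.getElem_mem _
  have hv := h _ hmem
  rw [hget]
  simp only [decide_eq_decide]
  omega

theorem pvActiveA_ne (kc : List Int) (a b : Int) (hb : b ∈ kc) (hab : a < b) :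
    pvActiveA kc b ≠ pvActiveA kc a := by
  obtain ⟨j0, hj0, hkj⟩ := List.mem_iff_getElem.mp hb
  have hj0' : ((j0 : Int)).toNat < kc.length := by
    rwa [Int.toNat_natCast]
  have hget : PySem.List.pyGetD kc (j0 : Int) 0 = kc[((j0 : Int)).toNat] :=
    PySem.List.pyGetD_eq_getElem kc 0 (Int.natCast_nonneg _) (by omega)
  have hval : PySem.List.pyGetD kc (j0 : Int) 0 = b := by
    rw [hget]; simpa [Int.toNat_natCast] using hkj
  intro heq
  have hmema : (j0 : Int) ∈ pvActiveA kc a := by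
    unfold pvActiveA
    rw [List.mem_filter, PySem.List.mem_pyRange_one]
    refine ⟨⟨Int.natCast_nonneg _, ?_⟩, ?_⟩
    · rw [PySem.List.len_eq]; exact_mod_cast hj0
    · rw [hval]; simpa using hab
  have hmemb : (j0 : Int) ∉ pvActiveA kc b := by
    unfold pvActiveA
    rw [List.mem_filter]
    rintro ⟨-, hdec⟩
    rw [hval] at hdec
    simp at hdec
  exact hmemb (heq ▸ hmema)

theorem pvNextB_le_of_mem (kc : List Int) (a n : Int) :
    ∀ v ∈ kc, a < v → pvNextB kc a n ≤ v := by
  intro v hv hav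
  unfold pvNextB
  have hvf : v ∈ kc.filter (fun v => v > a) := by
    rw [List.mem_filter]; exact ⟨hv, by simpa using hav⟩
  rcases hm : PySem.List.min? (kc.filter (fun v => v > a)) (fun x => x) with _ | m
  · have hnil := (PySem.List.min?_eq_none_iff (kc.filter (fun v => v > a)) (fun x => x)).mp hm
    rw [hnil] at hvf
    simp at hvf
  · have hd : PySem.List.minD (kc.filter (fun v => v > a)) (fun x => x) n = m := by
      simp [PySem.List.minD, hm]
    rw [hd]
    exact PySem.List.min?_isMin hm v hvf

theorem pvNextB_le (kc : List Int) (a n : Int) (hn : ∀ v ∈ kc, v ≤ n) :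
    pvNextB kc a n ≤ n := by
  unfold pvNextB
  rcases hm : PySem.List.min? (kc.filter (fun v => v > a)) (fun x => x) with _ | m
  · simp [PySem.List.minD, hm]
  · have hmem := PySem.List.min?_mem hm
    rw [List.mem_filter] at hmem
    have hd : PySem.List.minD (kc.filter (fun v => v > a)) (fun x => x) n = m := by
      simp [PySem.List.minD, hm]
    rw [hd]
    exact hn m hmem.1

theorem pvNextB_mem (kc : List Int) (a n : Int) (h : pvNextB kc a n ≠ n) :
    pvNextB kc a n ∈ kc ∧ a < pvNextB kc a n := by
  unfold pvNextB at *
  rcases hm : PySem.List.min? (kc.filter (fun v => v > a)) (fun x => x) with _ | m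
  · exact absurd (by simp [PySem.List.minD, hm]) h
  · have hmem := PySem.List.min?_mem hm
    rw [List.mem_filter] at hmem
    have hd : PySem.List.minD (kc.filter (fun v => v > a)) (fun x => x) n = m := by
      simp [PySem.List.minD, hm]
    rw [hd]
    exact ⟨hmem.1, by simpa using hmem.2⟩

theorem pvInnerA_eq (kc : List Int) (n a : Int) (hn : ∀ v ∈ kc, v ≤ n) (h0 : 0 ≤ a)
    (i1 : Int) (h1 : a < i1) (h2 : i1 ≤ pvNextB kc a n) :
    pvInnerA (pvAS kc n) n (pvActiveA kc a) i1 = pvNextB kc a n := by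
  unfold pvInnerA
  split
  next h =>
    have hget : PySem.List.pyGetD (pvAS kc n) i1 [] = pvActiveA kc i1 := by
      unfold pvAS
      exact PySem.List.pyGetD_map_pyRange_of_nonneg _ n i1 [] (by omega) h.1
    have hlt : i1 < pvNextB kc a n := by
      rcases lt_or_eq_of_le h2 with h' | h'
      · exact h'
      · exfalso
        have hbmem := pvNextB_mem kc a n (by omega)
        rw [← h'] at hbmem
        exact pvActiveA_ne kc a i1 hbmem.1 hbmem.2 (by rw [← hget, h.2])
    exact pvInnerA_eq kc n a hn h0 (i1 + 1) (by omega) (by omega)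
  next h =>
    by_cases hin : i1 < n
    · have hget : PySem.List.pyGetD (pvAS kc n) i1 [] = pvActiveA kc i1 := by
        unfold pvAS
        exact PySem.List.pyGetD_map_pyRange_of_nonneg _ n i1 [] (by omega) hin
      have hne : pvActiveA kc i1 ≠ pvActiveA kc a := fun hh => h ⟨hin, by rw [hget, hh]⟩
      rcases lt_or_eq_of_le h2 with h' | h'
      · exact absurd (pvActiveA_congr kc a i1 (le_of_lt h1)
          (fun v hv hc => by have := pvNextB_le_of_mem kc a n v hv hc.1; omega)) hne
      · exact h'
    · have := pvNextB_le kc a n hn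
      omega
termination_by (n - i1).toNat
decreasing_by omega

theorem pvOuter_eq (kc : List Int) (n : Int) (hn : ∀ v ∈ kc, v ≤ n) (a : Int) (h0 : 0 ≤ a) :
    pvOuterA (pvAS kc n) n a = pvAltLoop kc n a := by
  unfold pvOuterA pvAltLoop
  split
  next h =>
    have hget : PySem.List.pyGetD (pvAS kc n) a [] = pvActiveA kc a := by
      unfold pvAS
      exact PySem.List.pyGetD_map_pyRange_of_nonneg _ n a [] h0 h
    have hb := lt_pvNextB kc a n h
    have hble := pvNextB_le kc a n hn
    have hinner : pvInnerA (pvAS kc n) n (PySem.List.pyGetD (pvAS kc n) a []) (a + 1)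
        = pvNextB kc a n := by
      rw [hget]
      exact pvInnerA_eq kc n a hn h0 (a + 1) (by omega) (by omega)
    rw [hinner, hget, pvActiveB_eq, pvOuter_eq kc n hn (pvNextB kc a n) (by omega)]
  next h => rfl
termination_by (n - a).toNat
decreasing_by omega

-- ===== VERDICT (by name: the statement is the Claim_ definition above) =====
theorem zones_from_k_spec : Claim_equal_zones_from_k := by
  intro k n _
  unfold Spec_zones_from_k zones_from_k zones_from_k_alt
  have hlen : PySem.List.len k = PySem.List.len (k.map (fun kj => min (max 0 kj) n)) := by
    simp [PySem.List.len_eq]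
  rw [hlen]
  exact pvOuter_eq _ n (by intro v hv; simp at hv; omega) 0 le_rfl
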